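-- pv_equiv track=rewrite | github.com/glygener/glygen-backend-api | glygen/job_apilib.py | validate_protein_seq
-- ===== SOURCE A (Python) =====
-- def validate_protein_seq(seq):
--
--     seq = seq.upper()
--     e_list = []
--     aa_string = "ABCDEFGHIJKLMNOPQRSTUVWXYZ*-"
--     for i in range(len(aa_string)):
--         aa = aa_string[i]
--         seq = seq.replace(aa, "")
--     if seq.strip() != "":
--         e_list.append({"error_code": "bad characters in protein sequence"})
--     return e_list
-- ===== SOURCE B (Python) =====
-- def validate_protein_seq(seq):
--     allowed = set("ABCDEFGHIJKLMNOPQRSTUVWXYZ*-")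
--     e_list = []
--     if any(c not in allowed and not c.isspace() for c in seq.upper()):
--         e_list.append({"error_code": "bad characters in protein sequence"})
--     return e_list
-- ===== Notes on version B (the rewrite author's own statement) =====
-- stated objective: idiomatic
-- what changed: Replaces the 28 sequential str.replace passes plus a final strip with a single any() pass over the uppercased string testing set membership and whitespace per character.
import Mathlib
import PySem

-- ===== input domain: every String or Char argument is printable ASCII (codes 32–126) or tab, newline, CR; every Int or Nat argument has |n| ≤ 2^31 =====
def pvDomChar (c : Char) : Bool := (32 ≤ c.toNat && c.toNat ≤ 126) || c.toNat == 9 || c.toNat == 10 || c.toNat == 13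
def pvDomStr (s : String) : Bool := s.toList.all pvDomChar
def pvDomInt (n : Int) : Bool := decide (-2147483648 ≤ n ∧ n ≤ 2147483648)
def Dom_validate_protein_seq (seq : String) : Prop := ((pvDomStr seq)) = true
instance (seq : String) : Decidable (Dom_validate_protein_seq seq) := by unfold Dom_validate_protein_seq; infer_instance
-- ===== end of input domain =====

-- B replaces A's 28 sequential str.replace passes + final strip with one any() pass testing set membership / whitespace per character (idiomatic).


-- ===== PORT A =====
def validate_protein_seq (seq : String) : List (List (String × String)) :=
  let seq := PySem.Str.upper seq
  let e_list : List (List (String × String)) := []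
  let aa_string : String := "ABCDEFGHIJKLMNOPQRSTUVWXYZ*-"
  -- 'for i in range(len(aa_string)): aa = aa_string[i]; seq = seq.replace(aa, "")' — a fold over the characters of aa_string
  let seq := aa_string.toList.foldl (fun s aa => PySem.Str.replace s (String.ofList [aa]) "") seq
  if PySem.Str.strip seq ≠ "" then
    e_list ++ [[("error_code", "bad characters in protein sequence")]]
  else e_list

-- ===== PORT B =====
def validate_protein_seq_alt (seq : String) : List (List (String × String)) :=
  let allowed : PySem.Set Char := PySem.Set.ofList "ABCDEFGHIJKLMNOPQRSTUVWXYZ*-".toList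
  let e_list : List (List (String × String)) := []
  if (PySem.Str.upper seq).toList.any
      (fun c => !(PySem.Set.contains allowed c) && !(PySem.Chars.isspace c)) then
    e_list ++ [[("error_code", "bad characters in protein sequence")]]
  else e_list

-- ===== PRECONDITION & SPEC =====
def Spec_validate_protein_seq (seq : String) (out : List (List (String × String))) : Prop := out = validate_protein_seq_alt seq
instance (seq : String) (out : List (List (String × String))) : Decidable (Spec_validate_protein_seq seq out) := by unfold Spec_validate_protein_seq; infer_instance

-- ===== CLAIM (what is proved, stated in full; the proofs are below) =====
def Claim_equal_validate_protein_seq : Prop := ∀ (seq : String), Dom_validate_protein_seq seq → Spec_validate_protein_seq seq (validate_protein_seq seq)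

-- ===== LEMMAS AND PROOFS =====

-- replacing a single character by "" is filtering it out
theorem replace_go_single (a : Char) :
    ∀ (fuel : Nat) (l acc : List Char), l.length ≤ fuel →
      PySem.Chars.replace.go [a] [] fuel l acc = acc.reverse ++ l.filter (fun c => !(c == a)) := by
  intro fuel
  induction fuel with
  | zero => intro l acc h; cases l with
    | nil => simp [PySem.Chars.replace.go]
    | cons c t => simp at h
  | succ n ih =>
    intro l acc h
    cases l with
    | nil => simp [PySem.Chars.replace.go]
    | cons c t =>
      simp only [PySem.Chars.replace.go]
      by_cases hc : c = a
      · subst hc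
        simp only [List.isPrefixOf, beq_self_eq_true, Bool.true_and,
          if_pos, List.length_singleton, List.drop_one, List.tail_cons,
          List.reverse_nil, List.nil_append]
        rw [ih t acc (by simpa using Nat.le_of_succ_le_succ h)]
        simp
      · have hpre : [a].isPrefixOf (c :: t) = false := by
          simp [List.isPrefixOf]; exact fun h' => (hc h'.symm).elim
        rw [hpre]
        simp only [Bool.false_eq_true, if_false]
        rw [ih t (c :: acc) (by simpa using Nat.le_of_succ_le_succ h)]
        simp [hc]

theorem replace_single (a : Char) (cs : List Char) :
    PySem.Chars.replace cs [a] [] = cs.filter (fun c => !(c == a)) := by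
  simp only [PySem.Chars.replace, List.isEmpty_cons, if_false, Bool.false_eq_true]
  simpa using replace_go_single a cs.length cs [] (le_refl _)

-- folding the single-char deletions = one filter against the whole list
theorem foldl_filter (l : List Char) :
    ∀ u : List Char, l.foldl (fun s a => s.filter (fun c => !(c == a))) u
      = u.filter (fun c => !(l.contains c)) := by
  induction l with
  | nil => intro u; simp
  | cons a l ih =>
    intro u
    simp only [List.foldl_cons]
    rw [ih, List.filter_filter]
    apply List.filter_congr
    intro c _
    by_cases h1 : c = a
    · subst h1; by_cases h2 : c ∈ l <;> simp [h2]
    · by_cases h2 : c ∈ l <;> simp [h1, h2]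

theorem strip_eq_nil_iff (r : List Char) :
    PySem.Chars.strip r = [] ↔ ∀ c ∈ r, PySem.Chars.isspace c = true := by
  simp only [PySem.Chars.strip, PySem.Chars.rstrip, PySem.Chars.lstrip]
  rw [List.reverse_eq_nil_iff, List.dropWhile_eq_nil_iff]
  constructor
  · intro h c hc
    by_cases hd : c ∈ List.dropWhile PySem.Chars.isspace r
    · exact h c (List.mem_reverse.mpr hd)
    · -- c is in the dropped takeWhile prefix, whose elements all satisfy isspace
      have : c ∈ List.takeWhile PySem.Chars.isspace r := by
        have := List.takeWhile_append_dropWhile (p := PySem.Chars.isspace) (l := r)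
        rw [← this] at hc
        rcases List.mem_append.mp hc with h1 | h2
        · exact h1
        · exact absurd h2 hd
      exact List.mem_takeWhile_imp this
  · intro h c hc
    exact h c ((List.dropWhile_sublist _).subset (List.mem_reverse.mp hc))

-- the string-level fold of single-char replaces, seen on toList, is one filter
theorem toList_foldl_replace (l : List Char) : ∀ s : String,
    (l.foldl (fun s aa => PySem.Str.replace s (String.ofList [aa]) "") s).toList
      = s.toList.filter (fun c => !(l.contains c)) := by
  have step : ∀ s : String,
      (l.foldl (fun s aa => PySem.Str.replace s (String.ofList [aa]) "") s).toList
        = l.foldl (fun cs aa => cs.filter (fun c => !(c == aa))) s.toList := by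
    induction l with
    | nil => intro s; simp
    | cons a l ih =>
      intro s
      simp only [List.foldl_cons]
      rw [ih]
      congr 1
      simp [PySem.Str.replace, replace_single]
  intro s
  rw [step, foldl_filter]

-- ===== VERDICT (by name: the statement is the Claim_ definition above) =====
theorem validate_protein_seq_spec : Claim_equal_validate_protein_seq := by
  intro seq _
  unfold Spec_validate_protein_seq validate_protein_seq validate_protein_seq_alt
  simp only
  have hset : PySem.Set.ofList "ABCDEFGHIJKLMNOPQRSTUVWXYZ*-".toList
      = "ABCDEFGHIJKLMNOPQRSTUVWXYZ*-".toList := by decide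
  rw [hset]
  have key : (PySem.Str.strip
      ("ABCDEFGHIJKLMNOPQRSTUVWXYZ*-".toList.foldl
        (fun s aa => PySem.Str.replace s (String.ofList [aa]) "") (PySem.Str.upper seq)) ≠ "")
      ↔ ((PySem.Str.upper seq).toList.any
          (fun c => !(PySem.Set.contains "ABCDEFGHIJKLMNOPQRSTUVWXYZ*-".toList c)
            && !(PySem.Chars.isspace c)) = true) := by
    rw [PySem.Str.strip, ne_eq, ← String.toList_eq_nil_iff, String.toList_ofList,
      toList_foldl_replace, strip_eq_nil_iff]
    simp only [PySem.Set.contains, List.any_eq_true, List.mem_filter, not_forall]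
    constructor
    · rintro ⟨c, ⟨hc, hnc⟩, hns⟩
      exact ⟨c, hc, by simp_all⟩
    · rintro ⟨c, hc, h⟩
      simp only [Bool.and_eq_true, Bool.not_eq_true'] at h
      exact ⟨c, ⟨hc, by simp only [h.1, Bool.not_false]⟩, by simp [h.2]⟩
  split_ifs with h1 h2
  · rfl
  · exact absurd (key.mp h1) h2
  · exact absurd (key.mpr ‹_›) h1
  · rfl
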